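-- pv_equiv track=rewrite | github.com/baiango/AdageCodec | adage_trainer.py | align_text
-- ===== SOURCE A (Python) =====
-- def align_text(text):
-- 	'''Process text in reverse order and build token list'''
-- 	tokens = []
-- 	current_token = ''
--
-- 	for char in reversed(list(text)):
-- 		if char == ' ':
-- 			tokens.append(char + current_token[::-1])
-- 			current_token = ''
-- 		elif char in {',', '.', '\n', '\'', '"', ';', ':'}:
-- 			tokens.append(current_token[::-1])
-- 			tokens.append(char)
-- 			current_token = ''
-- 		else:
-- 			current_token += char
--
-- 	return [t for t in tokens if t][::-1]
-- ===== SOURCE B (Python) =====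
-- def align_text(text):
--     '''Single forward pass: skip the leading non-delimiter run, then emit one
--     token group per delimiter.'''
--     delims = {' ', ',', '.', '\n', '\'', '"', ';', ':'}
--     n = len(text)
--     i = 0
--     while i < n and text[i] not in delims:
--         i += 1
--     tokens = []
--     while i < n:
--         d = text[i]
--         i += 1
--         j = i
--         while j < n and text[j] not in delims:
--             j += 1
--         word = text[i:j]
--         i = j
--         if d == ' ':
--             tokens.append(' ' + word)
--         else:
--             tokens.append(d)
--             if word:
--                 tokens.append(word)
--     return tokens
-- ===== Notes on version B (the rewrite author's own statement) =====
-- stated objective: simpler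
-- what changed: A iterates over the reversed text, reversing each accumulated token and finally filtering and reversing the token list; B is one forward pass that skips the leading non-delimiter run and then, per delimiter, scans the following word and emits the tokens directly in order with no reversals and no final filter.
import Mathlib
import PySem

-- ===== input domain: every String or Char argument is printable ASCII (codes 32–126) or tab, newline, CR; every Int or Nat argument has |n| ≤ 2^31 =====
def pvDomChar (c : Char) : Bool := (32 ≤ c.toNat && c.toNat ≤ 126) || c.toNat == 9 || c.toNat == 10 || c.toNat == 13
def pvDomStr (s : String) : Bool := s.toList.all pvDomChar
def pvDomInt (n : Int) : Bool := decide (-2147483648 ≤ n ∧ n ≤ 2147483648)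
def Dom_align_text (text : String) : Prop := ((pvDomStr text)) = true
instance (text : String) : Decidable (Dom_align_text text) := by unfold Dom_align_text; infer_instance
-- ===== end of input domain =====

-- B replaces A's reversed iteration + per-token reversals + final filter/reverse with one
-- forward pass that emits tokens in order (objective: simpler/alternative; return value only).

-- ===== PORT A =====
-- one step of A's loop body; state = (tokens, current_token as chars)
def alignStep (st : List String × List Char) (c : Char) : List String × List Char :=
  if c = ' ' then (st.1 ++ [String.ofList (c :: st.2.reverse)], [])
  else if c = ',' || c = '.' || c = '\n' || c = '\'' || c = '"' || c = ';' || c = ':' then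
    (st.1 ++ [String.ofList st.2.reverse, String.ofList [c]], [])
  else (st.1, st.2 ++ [c])

def align_text (text : String) : List String :=
  let st := (text.toList.reverse).foldl alignStep ([], [])
  ((st.1.filter (fun t => t ≠ "")).reverse)

-- ===== PORT B =====
def isDelim (c : Char) : Bool :=
  c = ' ' || c = ',' || c = '.' || c = '\n' || c = '\'' || c = '"' || c = ';' || c = ':'

-- Source B's main while loop: read delimiter d, scan the following word run, emit
def altLoop : List Char → List String
  | [] => []
  | d :: rest =>
      let word := rest.takeWhile (fun c => !isDelim c)
      let rest' := rest.dropWhile (fun c => !isDelim c)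
      if d = ' ' then String.ofList (' ' :: word) :: altLoop rest'
      else if word = [] then String.ofList [d] :: altLoop rest'
      else String.ofList [d] :: String.ofList word :: altLoop rest'
  termination_by l => l.length
  decreasing_by
    all_goals exact Nat.lt_succ_of_le (List.length_dropWhile_le _ _)

def align_text_alt (text : String) : List String :=
  altLoop (text.toList.dropWhile (fun c => !isDelim c))

-- ===== PRECONDITION & SPEC =====
def Spec_align_text (text : String) (out : List String) : Prop := out = align_text_alt text
instance (text : String) (out : List String) : Decidable (Spec_align_text text out) := by unfold Spec_align_text; infer_instance

-- ===== CLAIM (what is proved, stated in full; the proofs are below) =====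
def Claim_equal_align_text : Prop := ∀ (text : String), Dom_align_text text → Spec_align_text text (align_text text)

-- ===== LEMMAS AND PROOFS =====

-- A's fold over the reversed list, seen as a foldr on the original list
def ACore (l : List Char) : List String × List Char :=
  l.foldr (fun c st => alignStep st c) ([], [])

theorem ACore_cons (c : Char) (l : List Char) :
    ACore (c :: l) = alignStep (ACore l) c := rfl

theorem ACore_eq (text : String) :
    (text.toList.reverse).foldl alignStep ([], []) = ACore text.toList := by
  simp [ACore, List.foldl_reverse]

theorem ofList_ne_empty (c : Char) (word : List Char) :
    String.ofList (c :: word) ≠ "" := by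
  intro h
  have := congrArg String.toList h
  simp at this

theorem ACore_snd (l : List Char) :
    (ACore l).2 = (l.takeWhile (fun c => !isDelim c)).reverse := by
  induction l with
  | nil => simp [ACore]
  | cons c l ih =>
    rw [ACore_cons]
    by_cases hsp : c = ' '
    · subst hsp; simp [alignStep, isDelim]
    · by_cases hd : isDelim c = true
      · have hP : c = ',' ∨ c = '.' ∨ c = '\n' ∨ c = '\'' ∨ c = '\"' ∨ c = ';' ∨ c = ':' := by
          simp [isDelim, hsp] at hd; tauto
        rcases hP with h|h|h|h|h|h|h <;> subst h <;>
          simp [alignStep, isDelim]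
      · have hP : ¬(c = ',' ∨ c = '.' ∨ c = '\n' ∨ c = '\'' ∨ c = '\"' ∨ c = ';' ∨ c = ':') := by
          simp [isDelim] at hd; tauto
        push Not at hP
        obtain ⟨h1, h2, h3, h4, h5, h6, h7⟩ := hP
        simp [alignStep, isDelim, hsp, h1, h2, h3, h4, h5, h6, h7, ih]

theorem main_lemma (l : List Char) :
    ((ACore l).1.filter (fun t => t ≠ "")).reverse
      = altLoop (l.dropWhile (fun c => !isDelim c)) := by
  induction l with
  | nil => simp [ACore, altLoop]
  | cons c l ih =>
    simp only [ne_eq, decide_not] at ih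
    by_cases hd : isDelim c = true
    · have hdrop : (c :: l).dropWhile (fun c => !isDelim c) = c :: l := by
        simp [hd]
      rw [hdrop, ACore_cons, altLoop]
      by_cases hsp : c = ' '
      · subst hsp
        simp [alignStep, List.filter_append, ACore_snd, ih, List.reverse_append]
      · have hP : c = ',' ∨ c = '.' ∨ c = '\n' ∨ c = '\'' ∨ c = '\"' ∨ c = ';' ∨ c = ':' := by
          simp only [isDelim, Bool.or_eq_true, decide_eq_true_eq] at hd; tauto

        have hfin : ∀ (cc : Char), ¬ cc = ' ' →
            (List.filter (fun t => t ≠ "")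
                ((ACore l).1 ++ [String.ofList (ACore l).2.reverse, String.ofList [cc]])).reverse
              = (if cc = ' ' then
                    String.ofList (' ' :: l.takeWhile (fun c => !isDelim c)) ::
                      altLoop (l.dropWhile (fun c => !isDelim c))
                  else if l.takeWhile (fun c => !isDelim c) = [] then
                    String.ofList [cc] :: altLoop (l.dropWhile (fun c => !isDelim c))
                  else
                    String.ofList [cc] :: String.ofList (l.takeWhile (fun c => !isDelim c)) ::
                      altLoop (l.dropWhile (fun c => !isDelim c))) := by
          intro cc hcc
          by_cases hw : l.takeWhile (fun c => !isDelim c) = []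
          · simp [List.filter_append, ACore_snd, hw, ih, hcc,
              List.reverse_append]
          · have hmkne : String.ofList (l.takeWhile (fun c => !isDelim c)) ≠ "" := by
              match hW : l.takeWhile (fun c => !isDelim c) with
              | [] => exact absurd hW hw
              | a :: w => exact ofList_ne_empty a w
            simp [List.filter_append, ACore_snd, hw, ih, hcc, hmkne,
              List.reverse_append]
        have hstep : alignStep (ACore l) c
            = ((ACore l).1 ++ [String.ofList (ACore l).2.reverse, String.ofList [c]], []) := by
          rcases hP with h|h|h|h|h|h|h <;> subst h <;> simp [alignStep]
        rw [hstep]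
        exact hfin c hsp
    · have hP : ¬(c = ' ' ∨ c = ',' ∨ c = '.' ∨ c = '\n' ∨ c = '\'' ∨ c = '\"' ∨ c = ';' ∨ c = ':') := by
        simp [isDelim] at hd; tauto
      push Not at hP
      obtain ⟨h1, h2, h3, h4, h5, h6, h7, h8⟩ := hP
      have htok : (ACore (c :: l)).1 = (ACore l).1 := by
        rw [ACore_cons]; simp [alignStep, h1, h2, h3, h4, h5, h6, h7, h8]
      have hdrop : (c :: l).dropWhile (fun c => !isDelim c)
          = l.dropWhile (fun c => !isDelim c) := by
        simp [hd]
      rw [htok, hdrop]; simpa using ih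

-- ===== VERDICT (by name: the statement is the Claim_ definition above) =====
theorem align_text_spec : Claim_equal_align_text := by
  intro text _
  unfold Spec_align_text align_text align_text_alt
  rw [ACore_eq]
  exact main_lemma text.toList
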